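-- pv_equiv track=rewrite | github.com/mathilda0902/seraph | main.py | begin_end_trace
-- ===== SOURCE A (Python) =====
-- def begin_end_trace(msg_list):
--     """
--     Catch the beginning line number of Traceback and the ending line number of the same Traceback. Catches all.
--     """
--     counter = 0
--     counter_tuple = []
--
--     for c, l in enumerate(msg_list):
--         if 'Traceback' in l and 'INFO' in l:
--             b_counter = c
--             counter = c
--
--             for sub_c, sub_l in enumerate(msg_list[counter:]):
--                 if 'ERROR' in sub_l:
--                     e_counter = sub_c + counter
--                     counter_tuple.append((b_counter, e_counter))
--
--     return (counter_tuple)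
-- ===== SOURCE B (Python) =====
-- def begin_end_trace(msg_list):
--     """Single backward pass: collect ERROR indices seen so far (descending);
--     at each Traceback-INFO line emit its block of pairs; reassemble front-to-back."""
--     errs_desc = []   # ERROR indices at or after the current position, descending
--     segs = []        # pair blocks, discovered back to front
--     for c, l in reversed(list(enumerate(msg_list))):
--         if 'ERROR' in l:
--             errs_desc.append(c)
--         if 'Traceback' in l and 'INFO' in l:
--             segs.append([(c, e) for e in reversed(errs_desc)])
--     out = []
--     for seg in reversed(segs):
--         out.extend(seg)
--     return out
-- ===== Notes on version B (the rewrite author's own statement) =====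
-- stated objective: alternative
-- what changed: A rescans the whole remaining suffix for ERROR lines at every Traceback-INFO line; B does one backward pass that maintains the ERROR indices seen so far and emits each Traceback's pair block immediately, reassembling the blocks front-to-back.
import Mathlib
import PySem

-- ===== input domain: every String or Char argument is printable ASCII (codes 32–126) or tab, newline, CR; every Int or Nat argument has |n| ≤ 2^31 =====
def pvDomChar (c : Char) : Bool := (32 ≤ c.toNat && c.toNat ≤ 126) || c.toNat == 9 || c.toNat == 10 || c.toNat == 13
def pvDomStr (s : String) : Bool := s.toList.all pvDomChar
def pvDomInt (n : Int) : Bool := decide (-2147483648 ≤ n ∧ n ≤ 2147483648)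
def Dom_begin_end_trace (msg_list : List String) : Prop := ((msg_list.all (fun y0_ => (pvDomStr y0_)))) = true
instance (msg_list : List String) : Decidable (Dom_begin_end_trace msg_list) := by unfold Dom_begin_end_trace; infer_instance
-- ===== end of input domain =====

-- B replaces A's per-Traceback rescan of the whole suffix by one backward pass that carries
-- the ERROR indices seen so far (objective: an alternative, single-pass algorithm).

-- helpers shared by both ports: the two line tests of the Python sources
def isT (l : String) : Bool := PySem.Str.isIn "Traceback" l && PySem.Str.isIn "INFO" l
def isE (l : String) : Bool := PySem.Str.isIn "ERROR" l

-- ===== PORT A =====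
-- A-side helper: the body of A's outer loop (inner loop = rescan of msg_list[counter:])
def betStepA (msg : List String) (st : Int × List (Int × Int)) (cl : Int × String) : Int × List (Int × Int) :=
  if isT cl.2 then
    (cl.1,
      (PySem.List.enumerate (PySem.List.slice msg (some cl.1) none) 0).foldl
        (fun acc (sub : Int × String) =>
          if isE sub.2 then acc ++ [(cl.1, sub.1 + cl.1)] else acc)
        st.2)
  else st

def begin_end_trace (msg_list : List String) : List (Int × Int) :=
  ((PySem.List.enumerate msg_list 0).foldl (betStepA msg_list) (0, [])).2

-- ===== PORT B =====
-- B-side helper: the body of B's single backward loop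
def betStepB (st : List Int × List (List (Int × Int))) (cl : Int × String) :
    List Int × List (List (Int × Int)) :=
  let errs_desc := if isE cl.2 then st.1 ++ [cl.1] else st.1
  let segs :=
    if isT cl.2 then st.2 ++ [errs_desc.reverse.map (fun e => (cl.1, e))] else st.2
  (errs_desc, segs)

def begin_end_trace_alt (msg_list : List String) : List (Int × Int) :=
  let st := (PySem.List.enumerate msg_list 0).reverse.foldl betStepB ([], [])
  st.2.reverse.foldl (fun out seg => out ++ seg) []

-- ===== PRECONDITION & SPEC =====
def Spec_begin_end_trace (msg_list : List String) (out : List (Int × Int)) : Prop := out = begin_end_trace_alt msg_list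
instance (msg_list : List String) (out : List (Int × Int)) : Decidable (Spec_begin_end_trace msg_list out) := by unfold Spec_begin_end_trace; infer_instance

-- ===== CLAIM (what is proved, stated in full; the proofs are below) =====
def Claim_equal_begin_end_trace : Prop := ∀ (msg_list : List String), Dom_begin_end_trace msg_list → Spec_begin_end_trace msg_list (begin_end_trace msg_list)

-- ===== LEMMAS AND PROOFS =====

-- common reference function: for each Traceback-INFO entry, pair its index with every
-- ERROR index of the remaining suffix (itself included)
def G : List (Int × String) → List (Int × Int)
  | [] => []
  | p :: rest =>
      (if isT p.2 then ((p :: rest).filter (fun q => isE q.2)).map (fun q => (p.1, q.1)) else [])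
        ++ G rest

-- ERROR indices of an enumerated suffix, ascending
def errsOf (L : List (Int × String)) : List Int := (L.filter (fun q => isE q.2)).map (·.1)

-- blocks produced by B, in order of discovery (back to front)
def segsOf : List (Int × String) → List (List (Int × Int))
  | [] => []
  | p :: rest =>
      segsOf rest ++ (if isT p.2 then [(errsOf (p :: rest)).map (fun e => (p.1, e))] else [])

lemma enumerate_shift {α : Type} (xs : List α) (t : Int) :
    PySem.List.enumerate xs t = (PySem.List.enumerate xs 0).map (fun p => (p.1 + t, p.2)) := by
  induction xs generalizing t with
  | nil => simp [PySem.List.enumerate_nil]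
  | cons x xs ih =>
    rw [PySem.List.enumerate_cons, PySem.List.enumerate_cons, ih (t + 1), ih (0 + 1)]
    simp only [List.map_map, List.map_cons]
    congr 1
    · simp
    · apply List.map_congr_left
      intro p _
      simp only [Function.comp_apply, Prod.mk.injEq, and_true]
      omega

-- A's inner rescan, rewritten over the enumerated suffix itself
lemma inner_eq (suf : List String) (j : Nat) (acc : List (Int × Int)) :
    (PySem.List.enumerate suf 0).foldl
      (fun acc (sub : Int × String) =>
        if isE sub.2 then acc ++ [((j : Int), sub.1 + (j : Int))] else acc) acc
    = acc ++ ((PySem.List.enumerate suf (j : Int)).filter (fun q => isE q.2)).map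
        (fun q => ((j : Int), q.1)) := by
  rw [PySem.List.foldl_append_if (fun sub : Int × String => isE sub.2)
        (fun sub : Int × String => ((j : Int), sub.1 + (j : Int)))]
  rw [enumerate_shift suf (j : Int), List.filter_map, List.map_map]
  rfl

lemma A_fold (msg : List String) (suf : List String) (j : Nat) (st : Int × List (Int × Int))
    (h : msg.drop j = suf) :
    ((PySem.List.enumerate suf (j : Int)).foldl (betStepA msg) st).2
      = st.2 ++ G (PySem.List.enumerate suf (j : Int)) := by
  induction suf generalizing j st with
  | nil => simp [PySem.List.enumerate_nil, G]
  | cons l rest ih =>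
    have hdrop : msg.drop (j + 1) = rest := by
      have := congrArg (List.drop 1) h
      simpa [List.drop_drop, Nat.add_comm] using this
    have hc : ((j : Int) + 1) = ((j + 1 : Nat) : Int) := by push_cast; ring
    rw [PySem.List.enumerate_cons, List.foldl_cons]
    by_cases hT : isT l = true
    · have hstep : betStepA msg st ((j : Int), l)
          = ((j : Int), st.2 ++ ((PySem.List.enumerate (l :: rest) (j : Int)).filter
              (fun q => isE q.2)).map (fun q => ((j : Int), q.1))) := by
        simp only [betStepA, hT, if_true]
        rw [PySem.List.slice_from_natCast msg j, h, inner_eq (l :: rest) j st.2]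
      rw [hstep, hc, ih (j + 1) _ hdrop, G]
      simp only [hT, if_true]
      rw [PySem.List.enumerate_cons, hc, List.append_assoc]
    · have hstep : betStepA msg st ((j : Int), l) = st := by
        simp only [betStepA, hT]
        simp
      rw [hstep, hc, ih (j + 1) st hdrop, G]
      simp only [hT]
      simp

lemma A_eq_G (msg : List String) : begin_end_trace msg = G (PySem.List.enumerate msg 0) := by
  have h0 : ((0 : Nat) : Int) = 0 := rfl
  have := A_fold msg msg 0 (0, []) (by simp)
  rw [h0] at this
  simpa [begin_end_trace] using this

lemma B_fold (L : List (Int × String)) :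
    L.foldr (fun x y => betStepB y x) ([], []) = ((errsOf L).reverse, segsOf L) := by
  induction L with
  | nil => simp [errsOf, segsOf]
  | cons p rest ih =>
    rw [List.foldr_cons, ih]
    have herrs : (if isE p.2 then (errsOf rest).reverse ++ [p.1] else (errsOf rest).reverse)
        = (errsOf (p :: rest)).reverse := by
      by_cases hE : isE p.2 = true <;> simp [errsOf, hE]
    simp only [betStepB]
    rw [herrs, segsOf]
    by_cases hT : isT p.2 = true <;> simp [hT]

lemma G_eq_flatten_segs (L : List (Int × String)) : G L = (segsOf L).reverse.flatten := by
  induction L with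
  | nil => simp [G, segsOf]
  | cons p rest ih =>
    rw [G, segsOf, List.reverse_append, List.flatten_append, ih]
    by_cases hT : isT p.2 = true
    · simp only [hT, if_true]
      congr 1
      simp [errsOf, List.map_map]
    · simp [hT]

lemma B_eq_G (msg : List String) : begin_end_trace_alt msg = G (PySem.List.enumerate msg 0) := by
  have h1 : (PySem.List.enumerate msg 0).reverse.foldl betStepB ([], [])
      = ((errsOf (PySem.List.enumerate msg 0)).reverse, segsOf (PySem.List.enumerate msg 0)) := by
    rw [List.foldl_reverse]
    exact B_fold _
  have h2 : ∀ (segs : List (List (Int × Int))),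
      segs.foldl (fun out seg => out ++ seg) [] = segs.flatten := by
    intro segs
    rw [show (fun (out seg : List (Int × Int)) => out ++ seg)
          = fun acc x => acc ++ id x from rfl,
        PySem.List.foldl_append_eq_flatMap]
    simp
  simp only [begin_end_trace_alt]
  rw [h1, h2, ← G_eq_flatten_segs]

-- ===== VERDICT (by name: the statement is the Claim_ definition above) =====
theorem begin_end_trace_spec : Claim_equal_begin_end_trace := by
  intro msg _
  unfold Spec_begin_end_trace
  rw [A_eq_G, B_eq_G]
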